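-- pv_equiv track=rewrite | github.com/shahhi/RaichuChessGame | code.py | moveNorthWest
-- ===== SOURCE A (Python) =====
-- from copy import deepcopy
--
-- def moveNorthWest(player, board2d, row, col):
--     moves=[]
--     kill_moves = []
--     N = len(board2d)
--     if player == 'w':
--         playerPieces = 'wW@'
--         opponentpieces = 'bB$'
--     else:
--         playerPieces = 'bB$'
--         opponentpieces = 'wW@'
--     move = deepcopy(board2d)
--     # Move till position above is empty
--     while row>=1 and col>=1 and move[row - 1][col - 1] == '.':
--         # move the piece if place is empty
--         move[row - 1][col - 1] = move[row][col]
--         move[row][col] = '.'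
--         col -= 1
--         row -= 1
--         moves.append(deepcopy(move))
--     # If there is opponent piece ahead, then we jump over it
--     if col >= 2 and row >=2 and move[row - 1][col - 1] in opponentpieces and move[row - 2][col - 2] == '.':
--         # check if we can kill the piece
--         move[row - 2][col - 2] = move[row][col]
--         move[row][col] = '.'
--         move[row - 1][col - 1] = '.'
--         col -= 2
--         row -= 2
--         kill_moves.append(deepcopy(move))
--         # Once killed we can only move till there are blank positions
--         while col >= 1 and row >=1 and move[row - 1][col - 1] == '.':
--             move[row - 1][col - 1] = move[row][col]
--             move[row][col] = '.'
--             col -= 1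
--             row -= 1
--             kill_moves.append(deepcopy(move))
--     return (moves, kill_moves)
-- ===== SOURCE B (Python) =====
-- def moveNorthWest(player, board2d, row, col):
--     opp = 'bB$' if player == 'w' else 'wW@'
--
--     def cell(r, c):
--         if 0 <= r < len(board2d) and 0 <= c < len(board2d[r]):
--             return board2d[r][c]
--         return None
--
--     def snap(changes):
--         return [[changes.get((i, j), v) for j, v in enumerate(rw)]
--                 for i, rw in enumerate(board2d)]
--
--     # collect the slide targets along the NW diagonal of the ORIGINAL board
--     targets = []
--     r, c = row - 1, col - 1
--     while r >= 0 and c >= 0 and cell(r, c) == '.':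
--         targets.append((r, c))
--         r, c = r - 1, c - 1
--     ch = cell(row, col)
--     moves = [snap({(row, col): '.', t: ch}) for t in targets]
--
--     kills = []
--     m = cell(r, c)
--     if r >= 1 and c >= 1 and m is not None and m in opp and cell(r - 1, c - 1) == '.':
--         kill_targets = [(r - 1, c - 1)]
--         r2, c2 = r - 2, c - 2
--         while r2 >= 0 and c2 >= 0 and cell(r2, c2) == '.':
--             kill_targets.append((r2, c2))
--             r2, c2 = r2 - 1, c2 - 1
--         kills = [snap({(row, col): '.', (r, c): '.', t: ch}) for t in kill_targets]
--     return (moves, kills)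
-- ===== Notes on version B (the rewrite author's own statement) =====
-- stated objective: alternative
-- what changed: B first walks the NW diagonal of the original board to collect the list of target squares (and the jump landing squares), then rebuilds every returned board snapshot independently from the original board via a change-dict (source cleared, jumped piece cleared, target set), instead of A's single mutable deepcopy that is incrementally mutated and re-deep-copied at every step.
-- outside the precondition, e.g. on moveNorthWest('w', [['x'], ['a', 'b']], 1, 1): A returns ([], []), B returns ([], []); on moveNorthWest('w', [['x', 'y'], ['a', 'b']], 2, 1): A returns ([], []), B returns ([], [])
import Mathlib
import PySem

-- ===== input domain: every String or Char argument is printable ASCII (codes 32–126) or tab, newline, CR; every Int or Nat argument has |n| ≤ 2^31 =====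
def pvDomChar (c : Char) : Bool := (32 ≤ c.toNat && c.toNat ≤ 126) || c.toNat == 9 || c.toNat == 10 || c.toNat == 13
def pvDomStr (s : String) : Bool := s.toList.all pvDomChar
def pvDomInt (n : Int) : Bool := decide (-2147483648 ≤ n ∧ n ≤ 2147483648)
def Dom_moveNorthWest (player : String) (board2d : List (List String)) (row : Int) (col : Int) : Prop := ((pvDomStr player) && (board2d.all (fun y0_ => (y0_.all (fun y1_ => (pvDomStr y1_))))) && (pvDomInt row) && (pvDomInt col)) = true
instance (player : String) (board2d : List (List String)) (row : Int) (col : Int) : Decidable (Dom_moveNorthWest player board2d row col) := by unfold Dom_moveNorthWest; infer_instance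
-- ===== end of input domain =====

-- B rebuilds every snapshot board from the ORIGINAL board (source cleared, target set, jumped piece cleared)
-- instead of A's mutate-then-deepcopy accumulator; objective: alternative decomposition, same cost.
-- Both ports are exact on Pre_; A mutates only its private deepcopy, so no caller-visible side effects.

-- ===== PORT A =====
-- board2d[r][c] read; Python raises out of range (excluded by Pre_), default "" is never reached under Pre_
def pvGet2 (b : List (List String)) (r c : Int) : String :=
  ((PySem.List.pyGet? b r).bind (fun rw => PySem.List.pyGet? rw c)).getD ""

-- board2d[r][c] = v ; exact for 0 ≤ r, c (every use in A sits behind guards r,c ≥ 0; Pre_ keeps them in range)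
def pvSet2 (b : List (List String)) (r c : Int) (v : String) : List (List String) :=
  b.set r.toNat ((b[r.toNat]?.getD []).set c.toNat v)

-- A's while loop (both slide loops have this body); fuel strictly exceeds the ≤ r iterations possible
def pvLoopA : Nat → List (List (List String)) → List (List String) → Int → Int →
    List (List (List String)) × List (List String) × Int × Int
  | 0, ms, m, r, c => (ms, m, r, c)
  | fuel+1, ms, m, r, c =>
    if r ≥ 1 ∧ c ≥ 1 ∧ pvGet2 m (r-1) (c-1) = "." then
      let m2 := pvSet2 (pvSet2 m (r-1) (c-1) (pvGet2 m r c)) r c "."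
      pvLoopA fuel (ms ++ [m2]) m2 (r-1) (c-1)
    else (ms, m, r, c)

def moveNorthWest (player : String) (board2d : List (List String)) (row : Int) (col : Int) :
    List (List (List String)) × List (List (List String)) :=
  let opp := if player = "w" then "bB$" else "wW@"
  let s := pvLoopA (row.toNat + 1) [] board2d row col
  let moves := s.1
  let m := s.2.1
  let r := s.2.2.1
  let c := s.2.2.2
  if c ≥ 2 ∧ r ≥ 2 ∧ PySem.Str.isIn (pvGet2 m (r-1) (c-1)) opp = true ∧ pvGet2 m (r-2) (c-2) = "." then
    let m1 := pvSet2 m (r-2) (c-2) (pvGet2 m r c)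
    let m2 := pvSet2 m1 r c "."
    let m3 := pvSet2 m2 (r-1) (c-1) "."
    (moves, (pvLoopA (r.toNat + 1) [m3] m3 (r-2) (c-2)).1)
  else (moves, [])

-- ===== PORT B =====
-- Source B's cell(r, c): bounds-checked read of the original board
def pvCell (b : List (List String)) (r c : Int) : Option String :=
  if 0 ≤ r ∧ r < (b.length : Int) ∧ 0 ≤ c ∧ c < ((b[r.toNat]?.getD []).length : Int) then
    (b[r.toNat]?.getD [])[c.toNat]?
  else none

-- Source B's target-collecting while loop; fuel strictly exceeds the ≤ r+1 iterations possible
def pvCollect : Nat → List (List String) → Int → Int → List (Int × Int) × Int × Int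
  | 0, _, r, c => ([], r, c)
  | fuel+1, b, r, c =>
    if r ≥ 0 ∧ c ≥ 0 ∧ pvCell b r c = some "." then
      let s := pvCollect fuel b (r-1) (c-1)
      ((r, c) :: s.1, s.2)
    else ([], r, c)

-- changes.get((i,j), default): first match in the (distinct-key) change list
def pvLookup : List ((Int × Int) × String) → Int × Int → Option String
  | [], _ => none
  | (k, v) :: rest, p => if k = p then some v else pvLookup rest p

-- Source B's snap(changes): rebuild the whole board from the original, applying the change dict
def pvSnap (b : List (List String)) (chs : List ((Int × Int) × String)) : List (List String) :=
  (PySem.List.enumerate b 0).map (fun p =>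
    (PySem.List.enumerate p.2 0).map (fun q => (pvLookup chs (p.1, q.1)).getD q.2))

def moveNorthWest_alt (player : String) (board2d : List (List String)) (row : Int) (col : Int) :
    List (List (List String)) × List (List (List String)) :=
  let opp := if player = "w" then "bB$" else "wW@"
  let s := pvCollect (row.toNat + 1) board2d (row - 1) (col - 1)
  let ts := s.1
  let r := s.2.1
  let c := s.2.2
  let ch := (pvCell board2d row col).getD ""
  let moves := ts.map (fun t => pvSnap board2d [((row, col), "."), (t, ch)])
  let kills :=
    if r ≥ 1 ∧ c ≥ 1 ∧
        (match pvCell board2d r c with | some m => PySem.Str.isIn m opp | none => false) = true ∧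
        pvCell board2d (r-1) (c-1) = some "." then
      ((r-1, c-1) :: (pvCollect (row.toNat + 1) board2d (r-2) (c-2)).1).map
        (fun t => pvSnap board2d [((row, col), "."), ((r, c), "."), (t, ch)])
    else []
  (moves, kills)

-- ===== PRECONDITION & SPEC =====
-- Pre_ excludes inputs whose NW walk can step on a missing cell (out-of-range or ragged-row boards with
-- 0 < row, col), on which A's chained indexing raises IndexError — and when the walk happens to stop before
-- the missing cell, A returns ([], []) only by accident of where the '.' cells lie.
def Pre_moveNorthWest (player : String) (board2d : List (List String)) (row : Int) (col : Int) : Prop :=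
  row ≤ 0 ∨ col ≤ 0 ∨
    (row < (board2d.length : Int) ∧ col < (((board2d.head?.getD []).length : Nat) : Int) ∧
     ∀ rw ∈ board2d, rw.length = (board2d.head?.getD []).length)
instance (player : String) (board2d : List (List String)) (row : Int) (col : Int) : Decidable (Pre_moveNorthWest player board2d row col) := by unfold Pre_moveNorthWest; infer_instance

def pvWitness_moveNorthWest : String × List (List String) × Int × Int :=
  ("w", [[".", "."], [".", "w"]], 1, 1)

def Spec_moveNorthWest (player : String) (board2d : List (List String)) (row : Int) (col : Int) (out : List (List (List String)) × List (List (List String))) : Prop := out = moveNorthWest_alt player board2d row col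
instance (player : String) (board2d : List (List String)) (row : Int) (col : Int) (out : List (List (List String)) × List (List (List String))) : Decidable (Spec_moveNorthWest player board2d row col out) := by unfold Spec_moveNorthWest; infer_instance

-- ===== CLAIM (what is proved, stated in full; the proofs are below) =====
def Claim_equal_moveNorthWest : Prop := ∀ (player : String) (board2d : List (List String)) (row : Int) (col : Int), Dom_moveNorthWest player board2d row col → Pre_moveNorthWest player board2d row col → Spec_moveNorthWest player board2d row col (moveNorthWest player board2d row col)


-- ===== LEMMAS AND PROOFS =====

-- cell-level reading of pvGet2 at nonnegative indices
theorem pvGet2_nonneg (b : List (List String)) (r c : Int) (hr : 0 ≤ r) (hc : 0 ≤ c) :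
    pvGet2 b r c = ((b[r.toNat]?.getD [])[c.toNat]?).getD "" := by
  unfold pvGet2
  rw [PySem.List.pyGet?_of_nonneg b hr]
  cases h : b[r.toNat]? with
  | none => simp
  | some rw0 => simp [PySem.List.pyGet?_of_nonneg rw0 hc]

-- cell-level reading of pvSnap
theorem pvSnap_cell (b : List (List String)) (l : List ((Int × Int) × String)) (i j : Nat) :
    ((pvSnap b l)[i]?.getD [])[j]? =
      ((b[i]?.getD [])[j]?).map (fun v => (pvLookup l ((i : Int), (j : Int))).getD v) := by
  unfold pvSnap
  rw [List.getElem?_map, PySem.List.getElem?_enumerate]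
  cases h : b[i]? with
  | none => simp
  | some rw =>
    simp only [Option.map_some, Option.getD_some]
    rw [List.getElem?_map, PySem.List.getElem?_enumerate]
    cases h2 : rw[j]? with
    | none => simp
    | some v => simp

theorem pvSnap_len (b : List (List String)) (l : List ((Int × Int) × String)) (i : Nat) :
    ((pvSnap b l)[i]?).map List.length = (b[i]?).map List.length := by
  unfold pvSnap
  rw [List.getElem?_map, PySem.List.getElem?_enumerate]
  cases h : b[i]? with
  | none => simp
  | some rw => simp [PySem.List.length_enumerate]

theorem pvSet2_len (b : List (List String)) (ii jj : Int) (v : String) (i : Nat) :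
    ((pvSet2 b ii jj v)[i]?).map List.length = (b[i]?).map List.length := by
  unfold pvSet2
  rw [List.getElem?_set]
  by_cases h : ii.toNat = i
  · subst h
    by_cases h2 : ii.toNat < b.length
    · rw [if_pos rfl, if_pos h2, List.getElem?_eq_getElem h2]
      simp
    · rw [if_pos rfl, if_neg h2, List.getElem?_eq_none (by omega)]
  · rw [if_neg h]

theorem pvSet2_cell (b : List (List String)) (ii jj : Int) (v : String) (i j : Nat) :
    ((pvSet2 b ii jj v)[i]?.getD [])[j]? =
      if i = ii.toNat ∧ j = jj.toNat then ((b[i]?.getD [])[j]?).map (fun _ => v)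
      else (b[i]?.getD [])[j]? := by
  unfold pvSet2
  rw [List.getElem?_set]
  by_cases hi : ii.toNat = i
  · subst hi
    rw [if_pos rfl]
    by_cases h2 : ii.toNat < b.length
    · rw [if_pos h2]
      simp only [Option.getD_some]
      by_cases hj : jj.toNat = j
      · subst hj
        have hcond : True ∧ jj.toNat = jj.toNat := ⟨trivial, rfl⟩
        rw [if_pos hcond, List.getElem?_set_self']
        cases hc : (b[ii.toNat]?.getD [])[jj.toNat]? <;> simp
      · rw [List.getElem?_set_ne hj, if_neg (by intro hh; exact hj hh.2.symm)]
    · rw [if_neg h2]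
      have hb : b[ii.toNat]? = none := List.getElem?_eq_none (by omega)
      rw [hb]
      simp
  · rw [if_neg hi, if_neg (by intro hh; exact hi hh.1.symm)]

theorem pvBoard_ext {b1 b2 : List (List String)}
    (hlen : ∀ i : Nat, (b1[i]?).map List.length = (b2[i]?).map List.length)
    (hcell : ∀ i j : Nat, (b1[i]?.getD [])[j]? = (b2[i]?.getD [])[j]?) : b1 = b2 := by
  apply List.ext_getElem?
  intro i
  cases h1 : b1[i]? with
  | none =>
    have := hlen i
    rw [h1] at this
    cases h2 : b2[i]? with
    | none => rfl
    | some rw2 => rw [h2] at this; simp at this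
  | some rw1 =>
    have := hlen i
    rw [h1] at this
    cases h2 : b2[i]? with
    | none => rw [h2] at this; simp at this
    | some rw2 =>
      rw [h2] at this
      simp only [Option.map_some, Option.some.injEq] at this
      congr 1
      apply List.ext_getElem?
      intro j
      have := hcell i j
      rw [h1, h2] at this
      simpa using this

theorem pvSnap_congr (b : List (List String)) {l1 l2 : List ((Int × Int) × String)}
    (h : ∀ i j : Nat, (hin : ((b[i]?.getD [])[j]?).isSome) →
      (pvLookup l1 ((i : Int), (j : Int))).getD (((b[i]?.getD [])[j]?).getD "")
        = (pvLookup l2 ((i : Int), (j : Int))).getD (((b[i]?.getD [])[j]?).getD "")) :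
    pvSnap b l1 = pvSnap b l2 := by
  apply pvBoard_ext
  · intro i; rw [pvSnap_len, pvSnap_len]
  · intro i j
    rw [pvSnap_cell, pvSnap_cell]
    cases hc : (b[i]?.getD [])[j]? with
    | none => rfl
    | some v =>
      have := h i j (by rw [hc]; rfl)
      rw [hc] at this
      simpa using this

theorem pvSnap_nil (b : List (List String)) : pvSnap b [] = b := by
  apply pvBoard_ext
  · intro i; rw [pvSnap_len]
  · intro i j
    rw [pvSnap_cell]
    cases hc : (b[i]?.getD [])[j]? <;> simp [pvLookup]

theorem pvSet2_snap (b : List (List String)) (l : List ((Int × Int) × String)) (ii jj : Int)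
    (v : String) (hi : 0 ≤ ii) (hj : 0 ≤ jj) :
    pvSet2 (pvSnap b l) ii jj v = pvSnap b (((ii, jj), v) :: l) := by
  apply pvBoard_ext
  · intro i; rw [pvSet2_len, pvSnap_len, pvSnap_len]
  · intro i j
    rw [pvSet2_cell, pvSnap_cell, pvSnap_cell]
    by_cases h : i = ii.toNat ∧ j = jj.toNat
    · rw [if_pos h]
      have e1 : ((i : Nat) : Int) = ii := by omega
      have e2 : ((j : Nat) : Int) = jj := by omega
      have hl : pvLookup (((ii, jj), v) :: l) ((i : Int), (j : Int)) = some v := by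
        simp [pvLookup, e1, e2]
      cases hc : (b[i]?.getD [])[j]? <;> simp [hl]
    · rw [if_neg h]
      have hne : ((ii, jj) : Int × Int) ≠ ((i : Int), (j : Int)) := by
        intro hh
        rw [Prod.mk.injEq] at hh
        exact h ⟨by omega, by omega⟩
      have hl : pvLookup (((ii, jj), v) :: l) ((i : Int), (j : Int)) = pvLookup l ((i : Int), (j : Int)) := by
        simp [pvLookup, hne]
      cases hc : (b[i]?.getD [])[j]? <;> simp [hl]

theorem pvLookup_none (l : List ((Int × Int) × String)) (p : Int × Int)
    (h : ∀ q ∈ l, q.1 ≠ p) : pvLookup l p = none := by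
  induction l with
  | nil => rfl
  | cons q rest ih =>
    cases q with
    | mk k v =>
      rw [pvLookup, if_neg (h (k, v) (List.mem_cons_self))]
      exact ih (fun q hq => h q (List.mem_cons_of_mem _ hq))

theorem pvGet2_snap (b : List (List String)) (l : List ((Int × Int) × String)) (r c : Int)
    (hr : 0 ≤ r) (hrn : r < (b.length : Int)) (hc : 0 ≤ c)
    (hcn : c < (((b[r.toNat]?.getD []).length : Nat) : Int)) :
    pvGet2 (pvSnap b l) r c = (pvLookup l (r, c)).getD (pvGet2 b r c) := by
  rw [pvGet2_nonneg _ _ _ hr hc, pvGet2_nonneg _ _ _ hr hc, pvSnap_cell]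
  have h1 : ((b[r.toNat]?.getD [])[c.toNat]?) = some (b[r.toNat]?.getD [])[c.toNat] :=
    List.getElem?_eq_getElem (by omega)
  rw [h1]
  simp only [Option.map_some, Option.getD_some]
  rw [Int.toNat_of_nonneg hr, Int.toNat_of_nonneg hc]

theorem pvCell_in (b : List (List String)) (r c : Int) (hr : 0 ≤ r) (hrn : r < (b.length : Int))
    (hc : 0 ≤ c) (hcn : c < (((b[r.toNat]?.getD []).length : Nat) : Int)) :
    pvCell b r c = some (pvGet2 b r c) := by
  unfold pvCell
  rw [if_pos ⟨hr, hrn, hc, hcn⟩, pvGet2_nonneg _ _ _ hr hc,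
    List.getElem?_eq_getElem (show c.toNat < (b[r.toNat]?.getD []).length by omega)]
  rfl

theorem pvCell_some (b : List (List String)) (r c : Int) (v : String) (h : pvCell b r c = some v) :
    pvGet2 b r c = v ∧ 0 ≤ r ∧ r < (b.length : Int) ∧ 0 ≤ c ∧
      c < (((b[r.toNat]?.getD []).length : Nat) : Int) := by
  unfold pvCell at h
  by_cases hco : 0 ≤ r ∧ r < (b.length : Int) ∧ 0 ≤ c ∧ c < (((b[r.toNat]?.getD []).length : Nat) : Int)
  · rw [if_pos hco] at h
    refine ⟨?_, hco.1, hco.2.1, hco.2.2.1, hco.2.2.2⟩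
    rw [pvGet2_nonneg _ _ _ hco.1 hco.2.2.1, h]
    rfl
  · rw [if_neg hco] at h
    cases h

theorem pvRow_len (b : List (List String)) (L : Nat) (hrect : ∀ rw0 ∈ b, rw0.length = L)
    (i : Nat) (h : i < b.length) : (b[i]?.getD []).length = L := by
  rw [List.getElem?_eq_getElem h]
  exact hrect _ (List.getElem_mem _)

theorem pvCollect_le (f : Nat) (b : List (List String)) (r c : Int) :
    (pvCollect f b r c).2.1 ≤ r ∧ (pvCollect f b r c).2.2 ≤ c ∧
      ∀ t ∈ (pvCollect f b r c).1, t.1 ≤ r ∧ t.2 ≤ c := by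
  induction f generalizing r c with
  | zero => simp [pvCollect]
  | succ f ih =>
    by_cases hg : r ≥ 0 ∧ c ≥ 0 ∧ pvCell b r c = some "."
    · simp only [pvCollect, if_pos hg]
      obtain ⟨h1, h2, h3⟩ := ih (r-1) (c-1)
      refine ⟨by omega, by omega, ?_⟩
      intro t ht
      rcases List.mem_cons.mp ht with h | h
      · subst h; exact ⟨le_refl r, le_refl c⟩
      · have := h3 t h; exact ⟨by omega, by omega⟩
    · simp [pvCollect, if_neg hg]

theorem pvCollect_dot (f : Nat) (b : List (List String)) (r c : Int)
    (h : pvGet2 b (r+1) (c+1) = ".") :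
    pvGet2 b ((pvCollect f b r c).2.1 + 1) ((pvCollect f b r c).2.2 + 1) = "." := by
  induction f generalizing r c with
  | zero => simpa [pvCollect] using h
  | succ f ih =>
    by_cases hg : r ≥ 0 ∧ c ≥ 0 ∧ pvCell b r c = some "."
    · simp only [pvCollect, if_pos hg]
      have e1 : r - 1 + 1 = r := by ring
      have e2 : c - 1 + 1 = c := by ring
      apply ih
      rw [e1, e2]
      exact (pvCell_some b r c "." hg.2.2).1
    · simp only [pvCollect, if_neg hg]
      exact h

-- the heart of the equivalence: A's mutate-and-append slide loop, started on a snapshot whose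
-- current piece square is (r,c), produces exactly B's per-target snapshots of the original board
theorem pvLoopA_eq (b : List (List String)) (L : Nat) (hrect : ∀ rw0 ∈ b, rw0.length = L)
    (ch : String) (base : List ((Int × Int) × String)) :
    ∀ (fA fB : Nat) (r c : Int) (ms : List (List (List String))),
      0 ≤ r → r < (b.length : Int) → 0 ≤ c → c < (L : Int) →
      (∀ q ∈ base, r < q.1.1) →
      pvGet2 b r c = "." →
      r.toNat < fA → r.toNat < fB →
      pvLoopA fA ms (pvSnap b (((r, c), ch) :: base)) r c =
        (ms ++ (pvCollect fB b (r-1) (c-1)).1.map (fun t => pvSnap b ((t, ch) :: base)),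
         pvSnap b ((((pvCollect fB b (r-1) (c-1)).2.1 + 1, (pvCollect fB b (r-1) (c-1)).2.2 + 1), ch) :: base),
         (pvCollect fB b (r-1) (c-1)).2.1 + 1,
         (pvCollect fB b (r-1) (c-1)).2.2 + 1) := by
  intro fA
  induction fA with
  | zero => intro fB r c ms _ _ _ _ _ _ hfA _; omega
  | succ fa ih =>
    intro fB r c ms hr hrN hc hcL hbase hdot hfA hfB
    cases fB with
    | zero => omega
    | succ fb =>
      have hrowlen : (b[(r-1).toNat]?.getD []).length = L :=
        pvRow_len b L hrect _ (by omega)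
      have hrowlen0 : (b[r.toNat]?.getD []).length = L :=
        pvRow_len b L hrect _ (by omega)
      -- reading one square NW of the piece sees the ORIGINAL board
      have hread : r ≥ 1 → c ≥ 1 →
          pvGet2 (pvSnap b (((r, c), ch) :: base)) (r-1) (c-1) = pvGet2 b (r-1) (c-1) := by
        intro h1 h2
        rw [pvGet2_snap b _ (r-1) (c-1) (by omega) (by omega) (by omega) (by rw [hrowlen]; omega)]
        rw [pvLookup_none]
        · rfl
        · intro q hq
          rcases List.mem_cons.mp hq with h | h
          · subst h
            intro hh
            rw [Prod.mk.injEq] at hh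
            omega
          · have hq1 := hbase q h
            intro hh
            have hh1 : q.1.1 = r - 1 := congrArg Prod.fst hh
            omega
      by_cases hg : r ≥ 1 ∧ c ≥ 1 ∧ pvGet2 b (r-1) (c-1) = "."
      · -- one more slide step on both sides
        obtain ⟨h1, h2, h3⟩ := hg
        rw [pvLoopA, if_pos ⟨h1, h2, by rw [hread h1 h2]; exact h3⟩]
        -- the piece square of the snapshot holds ch
        have hch : pvGet2 (pvSnap b (((r, c), ch) :: base)) r c = ch := by
          rw [pvGet2_snap b _ r c hr hrN hc (by rw [hrowlen0]; omega)]
          rw [pvLookup, if_pos rfl]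
          rfl
        rw [hch]
        rw [pvSet2_snap b _ (r-1) (c-1) ch (by omega) (by omega)]
        rw [pvSet2_snap b _ r c "." (by omega) (by omega)]
        -- absorb: the vacated square was '.' on the original board already
        have habs : pvSnap b (((r, c), ".") :: ((r-1, c-1), ch) :: ((r, c), ch) :: base)
            = pvSnap b (((r-1, c-1), ch) :: base) := by
          apply pvSnap_congr
          intro i j hin
          by_cases e1 : ((i : Int) = r ∧ (j : Int) = c)
          · have hc1 : ((r, c) : Int × Int) = ((i : Int), (j : Int)) := by
              rw [Prod.mk.injEq]; exact ⟨e1.1.symm, e1.2.symm⟩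
            have hne1 : ((r - 1, c - 1) : Int × Int) ≠ ((i : Int), (j : Int)) := by
              rw [Ne, Prod.mk.injEq]; omega
            have hbn : pvLookup base ((i : Int), (j : Int)) = none := by
              apply pvLookup_none
              intro q hq
              have hq1 := hbase q hq
              intro hh
              have hh1 : q.1.1 = (i : Int) := congrArg Prod.fst hh
              omega
            have hval : ((b[i]?.getD [])[j]?).getD "" = "." := by
              have h0 := pvGet2_nonneg b (i : Int) (j : Int) (Int.natCast_nonneg i) (Int.natCast_nonneg j)
              simp only [Int.toNat_natCast] at h0
              rw [← h0, e1.1, e1.2]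
              exact hdot
            simp only [pvLookup, if_pos hc1, if_neg hne1, hbn]
            simp [hval]
          · by_cases e2 : ((i : Int) = r - 1 ∧ (j : Int) = c - 1)
            · have hc2 : ((r - 1, c - 1) : Int × Int) = ((i : Int), (j : Int)) := by
                rw [Prod.mk.injEq]; exact ⟨e2.1.symm, e2.2.symm⟩
              have hne0 : ((r, c) : Int × Int) ≠ ((i : Int), (j : Int)) := by
                rw [Ne, Prod.mk.injEq]; intro hh; exact e1 ⟨hh.1.symm, hh.2.symm⟩
              simp only [pvLookup, if_neg hne0, if_pos hc2]
            · have hne0 : ((r, c) : Int × Int) ≠ ((i : Int), (j : Int)) := by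
                rw [Ne, Prod.mk.injEq]; intro hh; exact e1 ⟨hh.1.symm, hh.2.symm⟩
              have hne2 : ((r - 1, c - 1) : Int × Int) ≠ ((i : Int), (j : Int)) := by
                rw [Ne, Prod.mk.injEq]; intro hh; exact e2 ⟨hh.1.symm, hh.2.symm⟩
              simp only [pvLookup, if_neg hne0, if_neg hne2]
        rw [habs]
        -- unfold one step of B's collector
        have hcell : pvCell b (r-1) (c-1) = some "." := by
          rw [pvCell_in b (r-1) (c-1) (by omega) (by omega) (by omega) (by rw [hrowlen]; omega)]
          rw [h3]
        have hBg : (r-1 ≥ 0 ∧ c-1 ≥ 0 ∧ pvCell b (r-1) (c-1) = some ".") := ⟨by omega, by omega, hcell⟩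
        have e1 : r - 1 - 1 = r - 2 := by ring
        have e2 : c - 1 - 1 = c - 2 := by ring
        have hih := ih fb (r-1) (c-1) (ms ++ [pvSnap b (((r-1, c-1), ch) :: base)])
          (by omega) (by omega) (by omega) (by omega)
          (fun q hq => by have := hbase q hq; omega) h3 (by omega) (by omega)
        rw [hih]
        simp only [pvCollect, if_pos hBg]
        simp [e1, e2, List.append_assoc]
      · -- both loops stop here
        have hgA : ¬ (r ≥ 1 ∧ c ≥ 1 ∧ pvGet2 (pvSnap b (((r, c), ch) :: base)) (r-1) (c-1) = ".") := by
          intro ⟨h1, h2, h3⟩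
          exact hg ⟨h1, h2, by rw [← hread h1 h2]; exact h3⟩
        rw [pvLoopA, if_neg hgA]
        have hgB : ¬ (r-1 ≥ 0 ∧ c-1 ≥ 0 ∧ pvCell b (r-1) (c-1) = some ".") := by
          intro ⟨h1, h2, h3⟩
          exact hg ⟨by omega, by omega, (pvCell_some b (r-1) (c-1) "." h3).1⟩
        simp only [pvCollect, if_neg hgB]
        have e1 : r - 1 + 1 = r := by ring
        have e2 : c - 1 + 1 = c := by ring
        simp [e1, e2]

theorem pvSnap_eq_of_lookup (b : List (List String)) (l1 l2 : List ((Int × Int) × String))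
    (hp : ∀ p, pvLookup l1 p = pvLookup l2 p) : pvSnap b l1 = pvSnap b l2 := by
  apply pvSnap_congr
  intro i j _
  rw [hp]

theorem pvKeyNe (a c : Int × Int) (h : a.1 ≠ c.1) : a ≠ c := fun hh => h (congrArg Prod.fst hh)

theorem pvSnap_swap2 (b : List (List String)) (k1 k2 : Int × Int) (v1 v2 : String)
    (h : k1.1 ≠ k2.1) :
    pvSnap b [(k1, v1), (k2, v2)] = pvSnap b [(k2, v2), (k1, v1)] := by
  apply pvSnap_eq_of_lookup
  intro p
  simp only [pvLookup]
  by_cases e1 : k1 = p <;> by_cases e2 : k2 = p <;>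
    first
      | exact absurd (congrArg Prod.fst (e1.trans e2.symm)) h
      | simp [e1, e2]

theorem pvSnap_rot3 (b : List (List String)) (k1 k2 k3 : Int × Int) (v1 v2 v3 : String)
    (h13 : k1.1 ≠ k3.1) (h23 : k2.1 ≠ k3.1) :
    pvSnap b [(k1, v1), (k2, v2), (k3, v3)] = pvSnap b [(k3, v3), (k1, v1), (k2, v2)] := by
  apply pvSnap_eq_of_lookup
  intro p
  simp only [pvLookup]
  by_cases e1 : k1 = p <;> by_cases e2 : k2 = p <;> by_cases e3 : k3 = p <;>
    first
      | exact absurd (congrArg Prod.fst (e1.trans e3.symm)) h13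
      | exact absurd (congrArg Prod.fst (e2.trans e3.symm)) h23
      | simp [e1, e2, e3]

theorem pvSnap_rev3 (b : List (List String)) (k1 k2 k3 : Int × Int) (v1 v2 v3 : String)
    (h12 : k1.1 ≠ k2.1) (h13 : k1.1 ≠ k3.1) (h23 : k2.1 ≠ k3.1) :
    pvSnap b [(k1, v1), (k2, v2), (k3, v3)] = pvSnap b [(k3, v3), (k2, v2), (k1, v1)] := by
  apply pvSnap_eq_of_lookup
  intro p
  simp only [pvLookup]
  by_cases e1 : k1 = p <;> by_cases e2 : k2 = p <;> by_cases e3 : k3 = p <;>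
    first
      | exact absurd (congrArg Prod.fst (e1.trans e2.symm)) h12
      | exact absurd (congrArg Prod.fst (e1.trans e3.symm)) h13
      | exact absurd (congrArg Prod.fst (e2.trans e3.symm)) h23
      | simp [e1, e2, e3]

theorem pvJump_eq (b : List (List String)) (L : Nat) (hrect : ∀ rw0 ∈ b, rw0.length = L)
    (opp ch : String) (src : Int × Int) (R C : Int) (m : List (List String))
    (base' : List ((Int × Int) × String)) (fB : Nat)
    (hRn : R < (b.length : Int)) (hCl : C < (L : Int))
    (hfB : (R-2).toNat < fB)
    (hread1 : 2 ≤ R → 2 ≤ C → pvGet2 m (R-1) (C-1) = pvGet2 b (R-1) (C-1))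
    (hread2 : 2 ≤ R → 2 ≤ C → pvGet2 m (R-2) (C-2) = pvGet2 b (R-2) (C-2))
    (hch : 2 ≤ R → 2 ≤ C → pvGet2 m R C = ch)
    (hm3 : 2 ≤ R → 2 ≤ C → pvGet2 b (R-2) (C-2) = "." →
      pvSet2 (pvSet2 (pvSet2 m (R-2) (C-2) ch) R C ".") (R-1) (C-1) "." =
        pvSnap b (((R-2, C-2), ch) :: base'))
    (hbase' : ∀ q ∈ base', R - 2 < q.1.1)
    (hmap : ∀ t : Int × Int, t.1 ≤ R - 2 →
      pvSnap b ((t, ch) :: base') = pvSnap b [(src, "."), ((R-1, C-1), "."), (t, ch)]) :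
    (if C ≥ 2 ∧ R ≥ 2 ∧ PySem.Str.isIn (pvGet2 m (R-1) (C-1)) opp = true ∧
        pvGet2 m (R-2) (C-2) = "." then
      (pvLoopA (R.toNat + 1)
        [pvSet2 (pvSet2 (pvSet2 m (R-2) (C-2) (pvGet2 m R C)) R C ".") (R-1) (C-1) "."]
        (pvSet2 (pvSet2 (pvSet2 m (R-2) (C-2) (pvGet2 m R C)) R C ".") (R-1) (C-1) ".")
        (R-2) (C-2)).1
     else []) =
    (if R - 1 ≥ 1 ∧ C - 1 ≥ 1 ∧
        (match pvCell b (R-1) (C-1) with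
          | some s => PySem.Str.isIn s opp
          | none => false) = true ∧
        pvCell b (R-1-1) (C-1-1) = some "." then
      ((R-1-1, C-1-1) :: (pvCollect fB b (R-1-2) (C-1-2)).1).map
        (fun t => pvSnap b [(src, "."), ((R-1, C-1), "."), (t, ch)])
     else []) := by
  rw [show R - 1 - 1 = R - 2 from by ring, show C - 1 - 1 = C - 2 from by ring]
  by_cases hb : 2 ≤ R ∧ 2 ≤ C
  · obtain ⟨hbR, hbC⟩ := hb
    have hrow1 : (b[(R-1).toNat]?.getD []).length = L := pvRow_len b L hrect _ (by omega)
    have hrow2 : (b[(R-2).toNat]?.getD []).length = L := pvRow_len b L hrect _ (by omega)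
    have hcell1 : pvCell b (R-1) (C-1) = some (pvGet2 b (R-1) (C-1)) :=
      pvCell_in b (R-1) (C-1) (by omega) (by omega) (by omega) (by rw [hrow1]; omega)
    have hcell2 : pvCell b (R-2) (C-2) = some (pvGet2 b (R-2) (C-2)) :=
      pvCell_in b (R-2) (C-2) (by omega) (by omega) (by omega) (by rw [hrow2]; omega)
    by_cases hJ : PySem.Str.isIn (pvGet2 b (R-1) (C-1)) opp = true ∧ pvGet2 b (R-2) (C-2) = "."
    · rw [if_pos ⟨by omega, by omega, by rw [hread1 hbR hbC]; exact hJ.1,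
        by rw [hread2 hbR hbC]; exact hJ.2⟩]
      rw [if_pos ⟨by omega, by omega, by rw [hcell1]; exact hJ.1, by rw [hcell2, hJ.2]⟩]
      rw [hch hbR hbC, hm3 hbR hbC hJ.2]
      have hloop := pvLoopA_eq b L hrect ch base' (R.toNat + 1) fB (R-2) (C-2)
        [pvSnap b (((R-2, C-2), ch) :: base')]
        (by omega) (by omega) (by omega) (by omega) hbase' hJ.2 (by omega) (by omega)
      rw [hloop]
      have e3 : R - 1 - 2 = R - 2 - 1 := by ring
      have e4 : C - 1 - 2 = C - 2 - 1 := by ring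
      rw [e3, e4, List.map_cons]
      simp only []
      rw [hmap (R-2, C-2) (by omega)]
      have hmapeq : (pvCollect fB b (R-2-1) (C-2-1)).1.map (fun t => pvSnap b ((t, ch) :: base')) =
          (pvCollect fB b (R-2-1) (C-2-1)).1.map
            (fun t => pvSnap b [(src, "."), ((R-1, C-1), "."), (t, ch)]) := by
        apply List.map_congr_left
        intro t ht
        have := (pvCollect_le fB b (R-2-1) (C-2-1)).2.2 t ht
        exact hmap t (by omega)
      rw [hmapeq]
      rfl
    · rw [if_neg (fun hh => hJ ⟨by rw [← hread1 hbR hbC]; exact hh.2.2.1,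
        by rw [← hread2 hbR hbC]; exact hh.2.2.2⟩)]
      rw [if_neg (fun hh => by
        rw [hcell1] at hh
        rw [hcell2] at hh
        exact hJ ⟨hh.2.2.1, Option.some.injEq .. ▸ by
          have := hh.2.2.2
          simpa using this⟩)]
  · rw [if_neg (fun hh => hb ⟨hh.2.1, hh.1⟩), if_neg (fun hh => hb ⟨by omega, by omega⟩)]

theorem pvCollect_ge (f : Nat) (b : List (List String)) (r c : Int) (hr : -1 ≤ r) (hc : -1 ≤ c) :
    -1 ≤ (pvCollect f b r c).2.1 ∧ -1 ≤ (pvCollect f b r c).2.2 := by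
  induction f generalizing r c with
  | zero => simpa [pvCollect] using ⟨hr, hc⟩
  | succ f ih =>
    by_cases hg : r ≥ 0 ∧ c ≥ 0 ∧ pvCell b r c = some "."
    · simp only [pvCollect, if_pos hg]
      exact ih (r-1) (c-1) (by omega) (by omega)
    · simpa [pvCollect, if_neg hg] using ⟨hr, hc⟩

theorem pvGet2_snap_miss (b : List (List String)) (l : List ((Int × Int) × String)) (r c : Int)
    (hr : 0 ≤ r) (hrn : r < (b.length : Int)) (hc : 0 ≤ c)
    (hcn : c < (((b[r.toNat]?.getD []).length : Nat) : Int))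
    (hmiss : ∀ q ∈ l, q.1 ≠ (r, c)) :
    pvGet2 (pvSnap b l) r c = pvGet2 b r c := by
  rw [pvGet2_snap b l r c hr hrn hc hcn, pvLookup_none l _ hmiss]
  rfl

-- after a jump that follows a slide, A's three writes on the snapshot are one rebuilt snapshot
theorem pvM3_g1 (b : List (List String)) (ch : String) (R C rs cs : Int)
    (hrs : R < rs) (hR : 2 ≤ R) (hC : 2 ≤ C) :
    pvSet2 (pvSet2 (pvSet2 (pvSnap b [((R, C), ch), ((rs, cs), ".")]) (R-2) (C-2) ch) R C ".")
        (R-1) (C-1) "." =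
      pvSnap b [((R-2, C-2), ch), ((R-1, C-1), "."), ((R, C), "."), ((rs, cs), ".")] := by
  rw [pvSet2_snap _ _ _ _ _ (by omega) (by omega), pvSet2_snap _ _ _ _ _ (by omega) (by omega),
    pvSet2_snap _ _ _ _ _ (by omega) (by omega)]
  apply pvSnap_eq_of_lookup
  intro p
  simp only [pvLookup]
  by_cases em1 : ((R-1, C-1) : Int × Int) = p
  · have nm2 : ((R, C) : Int × Int) ≠ p := fun h => by
      have h0 : (R : Int) = R - 1 := congrArg Prod.fst (h.trans em1.symm); omega
    have nm3 : ((R-2, C-2) : Int × Int) ≠ p := fun h => by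
      have h0 : (R - 2 : Int) = R - 1 := congrArg Prod.fst (h.trans em1.symm); omega
    simp only [if_pos em1, if_neg nm2, if_neg nm3]
  · by_cases em2 : ((R, C) : Int × Int) = p
    · have nm3 : ((R-2, C-2) : Int × Int) ≠ p := fun h => by
        have h0 : (R - 2 : Int) = R := congrArg Prod.fst (h.trans em2.symm); omega
      simp only [if_neg em1, if_pos em2, if_neg nm3]
    · by_cases em3 : ((R-2, C-2) : Int × Int) = p
      · have nm4 : ((rs, cs) : Int × Int) ≠ p := fun h => by
          have h0 : (rs : Int) = R - 2 := congrArg Prod.fst (h.trans em3.symm); omega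
        simp only [if_neg em1, if_neg em2, if_pos em3, if_neg nm4]
      · simp only [if_neg em1, if_neg em2, if_neg em3]

-- each kill snapshot after a slide equals B's three-change rebuild (the vacated landing square of
-- the slide was '.' on the original board)
theorem pvMap_g1 (b : List (List String)) (ch : String) (R C rs cs : Int) (t : Int × Int)
    (ht : t.1 ≤ R - 2) (hrs : R < rs) (hdot : pvGet2 b R C = ".") :
    pvSnap b ((t, ch) :: [((R-1, C-1), "."), ((R, C), "."), ((rs, cs), ".")]) =
      pvSnap b [((rs, cs), "."), ((R-1, C-1), "."), (t, ch)] := by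
  apply pvSnap_congr
  intro i j hin
  simp only [pvLookup]
  by_cases emt : t = ((i : Int), (j : Int))
  · have nm1 : ((R-1, C-1) : Int × Int) ≠ ((i : Int), (j : Int)) := fun h => by
      have h0 : (R - 1 : Int) = t.1 := congrArg Prod.fst (h.trans emt.symm); omega
    have nm4 : ((rs, cs) : Int × Int) ≠ ((i : Int), (j : Int)) := fun h => by
      have h0 : (rs : Int) = t.1 := congrArg Prod.fst (h.trans emt.symm); omega
    simp only [if_pos emt, if_neg nm1, if_neg nm4]
  · by_cases em1 : ((R-1, C-1) : Int × Int) = ((i : Int), (j : Int))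
    · have nm4 : ((rs, cs) : Int × Int) ≠ ((i : Int), (j : Int)) := fun h => by
        have h0 : (rs : Int) = R - 1 := congrArg Prod.fst (h.trans em1.symm); omega
      simp only [if_neg emt, if_pos em1, if_neg nm4]
    · by_cases em2 : ((R, C) : Int × Int) = ((i : Int), (j : Int))
      · have nm4 : ((rs, cs) : Int × Int) ≠ ((i : Int), (j : Int)) := fun h => by
          have h0 : (rs : Int) = R := congrArg Prod.fst (h.trans em2.symm); omega
        simp only [if_neg emt, if_neg em1, if_pos em2, if_neg nm4]
        have h0 := pvGet2_nonneg b (i : Int) (j : Int) (Int.natCast_nonneg i) (Int.natCast_nonneg j)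
        simp only [Int.toNat_natCast] at h0
        rw [Prod.mk.injEq] at em2
        rw [← em2.1, ← em2.2] at h0
        rw [hdot] at h0
        simp [← h0]
      · by_cases em4 : ((rs, cs) : Int × Int) = ((i : Int), (j : Int))
        · simp only [if_neg emt, if_neg em1, if_neg em2, if_pos em4]
        · simp only [if_neg emt, if_neg em1, if_neg em2, if_neg em4]


-- ===== VERDICT (by name: the statement is the Claim_ definition above) =====
theorem moveNorthWest_spec : Claim_equal_moveNorthWest := by
  intro player board2d row col _ hpre
  unfold Spec_moveNorthWest
  by_cases hE : row ≤ 0 ∨ col ≤ 0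
  · -- the walk never starts: both sides return ([], [])
    have hA : pvLoopA (row.toNat + 1) [] board2d row col = ([], board2d, row, col) := by
      rw [pvLoopA, if_neg (by intro hh; rcases hh with ⟨h1, h2, _⟩; omega)]
    have hB : pvCollect (row.toNat + 1) board2d (row - 1) (col - 1) = ([], row - 1, col - 1) := by
      rw [pvCollect, if_neg (by intro hh; rcases hh with ⟨h1, h2, _⟩; omega)]
    simp only [moveNorthWest, moveNorthWest_alt, hA, hB]
    rw [if_neg (by intro hh; rcases hh with ⟨h1, h2, _⟩; omega)]
    rw [if_neg (by intro hh; rcases hh with ⟨h1, h2, _⟩; omega)]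
    simp
  · have hrow : 1 ≤ row := by omega
    have hcol : 1 ≤ col := by omega
    rcases hpre with h | h | ⟨hrN, hcL, hrect⟩
    · omega
    · omega
    have hrl0 : (board2d[row.toNat]?.getD []).length = (board2d.head?.getD []).length :=
      pvRow_len _ _ hrect _ (by omega)
    have hrl1 : (board2d[(row-1).toNat]?.getD []).length = (board2d.head?.getD []).length :=
      pvRow_len _ _ hrect _ (by omega)
    have hcell_src : pvCell board2d row col = some (pvGet2 board2d row col) :=
      pvCell_in _ _ _ (by omega) (by omega) (by omega) (by rw [hrl0]; omega)
    by_cases g1 : pvGet2 board2d (row - 1) (col - 1) = "."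
    · -- at least one ordinary slide step
      have hcell1 : pvCell board2d (row-1) (col-1) = some (pvGet2 board2d (row-1) (col-1)) :=
        pvCell_in _ _ _ (by omega) (by omega) (by omega) (by rw [hrl1]; omega)
      have hm2 : pvSet2 (pvSet2 board2d (row-1) (col-1) (pvGet2 board2d row col)) row col "." =
          pvSnap board2d (((row-1, col-1), pvGet2 board2d row col) :: [((row, col), ".")]) := by
        conv_lhs => rw [show pvSet2 (pvSet2 board2d (row-1) (col-1) (pvGet2 board2d row col))
              row col "." =
            pvSet2 (pvSet2 (pvSnap board2d []) (row-1) (col-1) (pvGet2 board2d row col))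
              row col "." from by rw [pvSnap_nil]]
        rw [pvSet2_snap _ _ _ _ _ (by omega) (by omega),
          pvSet2_snap _ _ _ _ _ (by omega) (by omega)]
        exact pvSnap_swap2 board2d (row, col) (row-1, col-1) "." (pvGet2 board2d row col)
          (by show row ≠ row - 1; omega)
      have hstep : pvLoopA (row.toNat + 1) [] board2d row col =
          pvLoopA row.toNat
            [pvSnap board2d (((row-1, col-1), pvGet2 board2d row col) :: [((row, col), ".")])]
            (pvSnap board2d (((row-1, col-1), pvGet2 board2d row col) :: [((row, col), ".")]))
            (row-1) (col-1) := by
        rw [pvLoopA, if_pos ⟨by omega, by omega, g1⟩]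
        simp only [hm2, List.nil_append]
      have hloop := pvLoopA_eq board2d (board2d.head?.getD []).length hrect
        (pvGet2 board2d row col) [((row, col), ".")] row.toNat row.toNat (row-1) (col-1)
        [pvSnap board2d (((row-1, col-1), pvGet2 board2d row col) :: [((row, col), ".")])]
        (by omega) (by omega) (by omega) (by omega)
        (fun q hq => by
          rcases List.mem_cons.mp hq with rfl | h0
          · show row - 1 < row; omega
          · cases h0)
        g1 (by omega) (by omega)
      have hBc : pvCollect (row.toNat + 1) board2d (row-1) (col-1) =
          ((row-1, col-1) :: (pvCollect row.toNat board2d (row-1-1) (col-1-1)).1,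
           (pvCollect row.toNat board2d (row-1-1) (col-1-1)).2) := by
        rw [pvCollect, if_pos ⟨by omega, by omega, by rw [hcell1, g1]⟩]
      simp only [moveNorthWest, moveNorthWest_alt, hstep, hloop, hBc, hcell_src, Option.getD_some]
      rw [← apply_ite (Prod.mk
        ([pvSnap board2d (((row-1, col-1), pvGet2 board2d row col) :: [((row, col), ".")])] ++
          List.map (fun t => pvSnap board2d ((t, pvGet2 board2d row col) :: [((row, col), ".")]))
            (pvCollect row.toNat board2d (row-1-1) (col-1-1)).1))]
      have hS := pvCollect_le row.toNat board2d (row-1-1) (col-1-1)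
      have hSg := pvCollect_ge row.toNat board2d (row-1-1) (col-1-1) (by omega) (by omega)
      have hdotRC : pvGet2 board2d ((pvCollect row.toNat board2d (row-1-1) (col-1-1)).2.1 + 1)
          ((pvCollect row.toNat board2d (row-1-1) (col-1-1)).2.2 + 1) = "." := by
        apply pvCollect_dot
        rw [show row - 1 - 1 + 1 = row - 1 from by ring,
          show col - 1 - 1 + 1 = col - 1 from by ring]
        exact g1
      set S := pvCollect row.toNat board2d (row-1-1) (col-1-1) with hSdef
      congr 1
      · -- the ordinary move lists agree
        rw [List.map_cons, List.singleton_append]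
        congr 1
        · exact pvSnap_swap2 board2d (row-1, col-1) (row, col) (pvGet2 board2d row col) "."
            (by show row - 1 ≠ row; omega)
        · apply List.map_congr_left
          intro t ht
          have := hS.2.2 t ht
          exact pvSnap_swap2 board2d t (row, col) (pvGet2 board2d row col) "."
            (by show t.1 ≠ row; omega)
      · -- the kill lists agree
        conv_rhs => rw [show S.2.1 = S.2.1 + 1 - 1 from by ring,
          show S.2.2 = S.2.2 + 1 - 1 from by ring]
        have hrlR1 : (board2d[(S.2.1 + 1 - 1).toNat]?.getD []).length =
            (board2d.head?.getD []).length := pvRow_len _ _ hrect _ (by omega)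
        have hrlR2 : (board2d[(S.2.1 + 1 - 2).toNat]?.getD []).length =
            (board2d.head?.getD []).length := pvRow_len _ _ hrect _ (by omega)
        have hrlR0 : (board2d[(S.2.1 + 1).toNat]?.getD []).length =
            (board2d.head?.getD []).length := pvRow_len _ _ hrect _ (by omega)
        refine pvJump_eq board2d (board2d.head?.getD []).length hrect _ (pvGet2 board2d row col)
          (row, col) (S.2.1 + 1) (S.2.2 + 1)
          (pvSnap board2d (((S.2.1 + 1, S.2.2 + 1), pvGet2 board2d row col) ::
            [((row, col), ".")]))
          [((S.2.1 + 1 - 1, S.2.2 + 1 - 1), "."), ((S.2.1 + 1, S.2.2 + 1), "."),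
            ((row, col), ".")]
          (row.toNat + 1)
          (by omega) (by omega) (by omega) ?r1 ?r2 ?chv ?m3 ?bs ?mp
        case r1 =>
          intro hR hC
          refine pvGet2_snap_miss board2d _ _ _ (by omega) (by omega) (by omega)
            (by rw [hrlR1]; omega) ?_
          intro q hq
          rcases List.mem_cons.mp hq with rfl | hq2
          · exact pvKeyNe _ _ (by show S.2.1 + 1 ≠ S.2.1 + 1 - 1; omega)
          · rcases List.mem_cons.mp hq2 with rfl | hq3
            · exact pvKeyNe _ _ (by show row ≠ S.2.1 + 1 - 1; omega)
            · cases hq3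
        case r2 =>
          intro hR hC
          refine pvGet2_snap_miss board2d _ _ _ (by omega) (by omega) (by omega)
            (by rw [hrlR2]; omega) ?_
          intro q hq
          rcases List.mem_cons.mp hq with rfl | hq2
          · exact pvKeyNe _ _ (by show S.2.1 + 1 ≠ S.2.1 + 1 - 2; omega)
          · rcases List.mem_cons.mp hq2 with rfl | hq3
            · exact pvKeyNe _ _ (by show row ≠ S.2.1 + 1 - 2; omega)
            · cases hq3
        case chv =>
          intro hR hC
          rw [pvGet2_snap board2d _ _ _ (by omega) (by omega) (by omega) (by rw [hrlR0]; omega)]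
          rw [pvLookup, if_pos rfl]
          rfl
        case m3 =>
          intro hR hC _
          exact pvM3_g1 board2d (pvGet2 board2d row col) (S.2.1 + 1) (S.2.2 + 1) row col
            (by omega) hR hC
        case bs =>
          intro q hq
          rcases List.mem_cons.mp hq with rfl | hq2
          · show S.2.1 + 1 - 2 < S.2.1 + 1 - 1; omega
          · rcases List.mem_cons.mp hq2 with rfl | hq3
            · show S.2.1 + 1 - 2 < S.2.1 + 1; omega
            · rcases List.mem_cons.mp hq3 with rfl | hq4
              · show S.2.1 + 1 - 2 < row; omega
              · cases hq4
        case mp =>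
          intro t ht
          exact pvMap_g1 board2d (pvGet2 board2d row col) (S.2.1 + 1) (S.2.2 + 1) row col t ht
            (by omega) hdotRC
    · -- no ordinary slide: the loop stops immediately on both sides
      have hA : pvLoopA (row.toNat + 1) [] board2d row col = ([], board2d, row, col) := by
        rw [pvLoopA, if_neg (fun hh => g1 hh.2.2)]
      have hBc : pvCollect (row.toNat + 1) board2d (row - 1) (col - 1) = ([], row - 1, col - 1) := by
        rw [pvCollect, if_neg (fun hh => g1 (pvCell_some _ _ _ _ hh.2.2).1)]
      simp only [moveNorthWest, moveNorthWest_alt, hA, hBc, hcell_src, Option.getD_some,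
        List.map_nil]
      rw [← apply_ite (Prod.mk ([] : List (List (List String))))]
      refine congrArg (Prod.mk []) ?_
      refine pvJump_eq board2d (board2d.head?.getD []).length hrect _ (pvGet2 board2d row col)
        (row, col) row col
        board2d [((row-1, col-1), "."), ((row, col), ".")] (row.toNat + 1)
        hrN (by omega) (by omega)
        (fun _ _ => rfl) (fun _ _ => rfl) (fun _ _ => rfl) ?hm3 ?hbase ?hmap
      case hm3 =>
        intro hR hC hdot2
        conv_lhs => rw [show pvSet2 (pvSet2 (pvSet2 board2d (row-2) (col-2)
              (pvGet2 board2d row col)) row col ".") (row-1) (col-1) "." =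
          pvSet2 (pvSet2 (pvSet2 (pvSnap board2d []) (row-2) (col-2)
              (pvGet2 board2d row col)) row col ".") (row-1) (col-1) "." from by rw [pvSnap_nil]]
        rw [pvSet2_snap _ _ _ _ _ (by omega) (by omega),
          pvSet2_snap _ _ _ _ _ (by omega) (by omega),
          pvSet2_snap _ _ _ _ _ (by omega) (by omega)]
        exact pvSnap_rot3 board2d (row-1, col-1) (row, col) (row-2, col-2) "." "."
          (pvGet2 board2d row col) (by show row - 1 ≠ row - 2; omega)
          (by show row ≠ row - 2; omega)
      case hbase =>
        intro q hq
        rcases List.mem_cons.mp hq with rfl | hq2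
        · show row - 2 < row - 1; omega
        · rcases List.mem_cons.mp hq2 with rfl | hq3
          · show row - 2 < row; omega
          · cases hq3
      case hmap =>
        intro t ht
        exact pvSnap_rev3 board2d t (row-1, col-1) (row, col) (pvGet2 board2d row col) "." "."
          (by show t.1 ≠ row - 1; omega) (by show t.1 ≠ row; omega)
          (by show row - 1 ≠ row; omega)
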